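-- pv_equiv track=rewrite | github.com/EduardoMVAz/bctci | two-pointers/reverse_case_match.py | reverse_case_match
-- ===== SOURCE A (Python) =====
-- def is_lowercase(s: str):
--     return ord(s) >= ord('a') and ord(s) <= ord('z')
--
-- def is_uppercase(s: str):
--     return ord(s) >= ord('A') and ord(s) <= ord('Z')
--
-- def reverse_case_match(s: str):
--     p1 = 0
--     p2 = len(s)-1
--     lowercase = []
--     uppercase = []
--
--     for i in range(len(s)):
--         if is_lowercase(s[p1]):
--             lowercase.append(s[p1])
--
--         if is_uppercase(s[p2]):
--             uppercase.append(s[p2])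
--
--         p1 += 1
--         p2 -= 1
--
--     uppercase = "".join(uppercase)
--     lowercase = "".join(lowercase)
--
--     return lowercase == uppercase.lower()
-- ===== SOURCE B (Python) =====
-- def is_lowercase(s: str):
--     return ord(s) >= ord('a') and ord(s) <= ord('z')
--
-- def is_uppercase(s: str):
--     return ord(s) >= ord('A') and ord(s) <= ord('Z')
--
-- def reverse_case_match(s: str):
--     # Stack algorithm: push the lowered uppercase letters in one forward pass,
--     # then pop-match them (LIFO = reverse order) against the lowercase letters
--     # in a second forward pass; no backward traversal, no string building.
--     stack = []
--     for c in s: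
--         if is_uppercase(c):
--             stack.append(chr(ord(c) + 32))
--     for c in s:
--         if is_lowercase(c):
--             if not stack or stack[-1] != c:
--                 return False
--             stack.pop()
--     return not stack
-- ===== Notes on version B (the rewrite author's own statement) =====
-- stated objective: alternative
-- what changed: A walks two indices (forward and backward) simultaneously, builds two letter lists, joins them into strings and compares lowercase forward against the whole lowercased uppercase-backward string; B never traverses backwards: it pushes the lowered uppercase letters onto a stack in one forward pass and then pop-matches them LIFO against the lowercase letters in a second forward pass, exiting early on the first mismatch. (faster by early exit and by skipping the join/lower string building)
import Mathlib
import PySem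

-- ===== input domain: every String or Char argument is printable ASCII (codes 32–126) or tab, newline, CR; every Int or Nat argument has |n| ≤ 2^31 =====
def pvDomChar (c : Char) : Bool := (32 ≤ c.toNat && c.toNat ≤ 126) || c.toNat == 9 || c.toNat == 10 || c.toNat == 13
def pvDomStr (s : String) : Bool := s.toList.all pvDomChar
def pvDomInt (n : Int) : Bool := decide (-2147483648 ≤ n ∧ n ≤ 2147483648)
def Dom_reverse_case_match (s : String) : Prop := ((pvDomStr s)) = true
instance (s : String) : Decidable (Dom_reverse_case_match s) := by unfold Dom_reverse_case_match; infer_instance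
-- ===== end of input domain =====

-- B replaces A's forward+backward double-index walk and string comparison with a
-- forward-only stack algorithm (push lowered uppercase, pop-match lowercase);
-- same return value, proved below.

-- ===== PORT A =====
-- A's helpers: ord-range tests, exactly as written
def pv_is_lowercase (c : Char) : Bool := decide ('a'.toNat ≤ c.toNat) && decide (c.toNat ≤ 'z'.toNat)
def pv_is_uppercase (c : Char) : Bool := decide ('A'.toNat ≤ c.toNat) && decide (c.toNat ≤ 'Z'.toNat)

-- one iteration of A's for-loop, state = (p1, p2, lowercase, uppercase);
-- p1 and p2 are always in range inside the loop, so pyGetD's default is never used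
def pvStepA (l : List Char) (st : Int × Int × List Char × List Char) (_i : Int) :
    Int × Int × List Char × List Char :=
  let lo := if pv_is_lowercase (PySem.List.pyGetD l st.1 ' ')
            then st.2.2.1 ++ [PySem.List.pyGetD l st.1 ' '] else st.2.2.1
  let up := if pv_is_uppercase (PySem.List.pyGetD l st.2.1 ' ')
            then st.2.2.2 ++ [PySem.List.pyGetD l st.2.1 ' '] else st.2.2.2
  (st.1 + 1, st.2.1 - 1, lo, up)

def reverse_case_match (s : String) : Bool :=
  let l := s.toList
  let st := (PySem.List.pyRange 0 (l.length : Int) 1).foldl (pvStepA l)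
              (0, (l.length : Int) - 1, [], [])
  let uppercase := PySem.Chars.join [] (st.2.2.2.map (fun c => [c]))  -- "".join(uppercase)
  let lowercase := PySem.Chars.join [] (st.2.2.1.map (fun c => [c]))  -- "".join(lowercase)
  lowercase == PySem.Chars.lower uppercase

-- ===== PORT B =====
-- B's first loop: push chr(ord(c)+32) for each uppercase c (Python append = at the end)
def pvPushUps (l : List Char) : List Char :=
  l.foldl (fun st c => if pv_is_uppercase c then st ++ [Char.ofNat (c.toNat + 32)] else st) []

-- B's second loop: for each lowercase c, compare with stack[-1] and pop, early False
def pvMatchLow : List Char → List Char → Bool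
  | stack, [] => stack.isEmpty            -- "return not stack"
  | stack, c :: cs =>
    if pv_is_lowercase c then
      match stack.getLast? with
      | none => false                     -- "not stack"
      | some t => if t = c then pvMatchLow stack.dropLast cs else false
    else pvMatchLow stack cs

def reverse_case_match_alt (s : String) : Bool :=
  pvMatchLow (pvPushUps s.toList) s.toList

-- ===== PRECONDITION & SPEC =====
def Spec_reverse_case_match (s : String) (out : Bool) : Prop := out = reverse_case_match_alt s
instance (s : String) (out : Bool) : Decidable (Spec_reverse_case_match s out) := by unfold Spec_reverse_case_match; infer_instance

-- ===== CLAIM =====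
def Claim_equal_reverse_case_match : Prop := ∀ (s : String), Dom_reverse_case_match s → Spec_reverse_case_match s (reverse_case_match s)

-- ===== LEMMAS AND PROOFS =====

-- the lowered uppercase char (chr(ord(c) + 32))
def pvLowOf (c : Char) : Char := Char.ofNat (c.toNat + 32)

-- B's first loop computes the mapped filter
theorem pvPushUps_eq (l : List Char) :
    pvPushUps l = (l.filter pv_is_uppercase).map pvLowOf := by
  suffices h : ∀ acc, l.foldl
      (fun st c => if pv_is_uppercase c then st ++ [Char.ofNat (c.toNat + 32)] else st) acc
      = acc ++ (l.filter pv_is_uppercase).map pvLowOf by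
    simpa using h []
  induction l with
  | nil => simp
  | cons c cs ih =>
    intro acc
    simp only [List.foldl_cons, List.filter_cons]
    split <;> simp [ih, pvLowOf]

-- B's second loop decides equality with the reversed stack
theorem pvMatchLow_eq (xs : List Char) : ∀ stack,
    pvMatchLow stack xs = decide (xs.filter pv_is_lowercase = stack.reverse) := by
  induction xs with
  | nil =>
    intro stack
    cases stack <;> simp [pvMatchLow]
  | cons c cs ih =>
    intro stack
    simp only [pvMatchLow, List.filter_cons]
    by_cases hlo : pv_is_lowercase c
    · simp only [hlo, if_true]
      rcases hst : stack.getLast? with _ | t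
      · have : stack = [] := List.getLast?_eq_none_iff.mp hst
        subst this; simp
      · have hne : stack ≠ [] := by
          intro h; subst h; simp at hst
        have hdec : stack = stack.dropLast ++ [t] := by
          conv_lhs => rw [← List.dropLast_concat_getLast hne]
          rw [List.getLast_eq_iff_getLast?_eq_some hne |>.mpr hst]
        show (if t = c then pvMatchLow stack.dropLast cs else false)
          = decide (c :: cs.filter pv_is_lowercase = stack.reverse)
        by_cases htc : t = c
        · subst htc
          rw [if_pos rfl, ih]
          conv_rhs => rw [hdec]
          simp
        · rw [if_neg htc]
          conv_rhs => rw [hdec]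
          simp
          exact fun h _ => htc h.symm
    · simp [hlo, ih]

-- A's loop invariant: after k iterations the two accumulators are the filters of the
-- forward and backward prefixes of length k
theorem stepA_inv (l : List Char) (k : Nat) (hk : k ≤ l.length) :
    (PySem.List.pyRange 0 (k : Int) 1).foldl (pvStepA l) (0, (l.length : Int) - 1, [], [])
    = ((k : Int), (l.length : Int) - 1 - k,
       (l.take k).filter pv_is_lowercase, (l.reverse.take k).filter pv_is_uppercase) := by
  induction k with
  | zero => simp [PySem.List.pyRange_one_eq_nil]
  | succ k ih =>
    have hkl : k < l.length := hk
    have h1 : (((k + 1 : Nat)) : Int) = (k : Int) + 1 := by push_cast; ring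
    rw [h1, PySem.List.pyRange_one_succ_right (by positivity), List.foldl_append,
        ih (by omega)]
    have hg1 : PySem.List.pyGetD l (k : Int) ' ' = l[k] := by
      rw [PySem.List.pyGetD_natCast]; exact List.getD_eq_getElem l ' ' hkl
    have hg2 : PySem.List.pyGetD l ((l.length : Int) - 1 - k) ' ' = l.reverse[k]'(by simp [hkl]) := by
      rw [PySem.List.pyGetD_eq_getElem l ' ' (by omega) (by omega)]
      have ht : (((l.length : Int) - 1 - k)).toNat = l.length - 1 - k := by omega
      simp only [ht]
      rw [List.getElem_reverse]
    have htk : l.take (k + 1) = l.take k ++ [l[k]] := by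
      rw [List.take_add_one]; simp [hkl]
    have htk2 : l.reverse.take (k + 1) = l.reverse.take k ++ [l.reverse[k]'(by simp [hkl])] := by
      rw [List.take_add_one]; simp [hkl]
    simp only [List.foldl_cons, List.foldl_nil, pvStepA, hg1, hg2, htk, htk2, List.filter_append]
    refine Prod.ext (by ring) (Prod.ext (by ring) (Prod.ext ?_ ?_)) <;>
      · simp [List.filter_cons]; split <;> simp

-- what A's whole loop produces
theorem A_eq (l : List Char) :
    ((PySem.List.pyRange 0 (l.length : Int) 1).foldl (pvStepA l)
        (0, (l.length : Int) - 1, [], []))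
    = ((l.length : Int), -1, l.filter pv_is_lowercase, l.reverse.filter pv_is_uppercase) := by
  have h := stepA_inv l l.length le_rfl
  rw [List.take_of_length_le le_rfl, List.take_of_length_le (by simp)] at h
  simpa using h

theorem char_le_iff (a b : Char) : a ≤ b ↔ a.toNat ≤ b.toNat := by
  rw [Char.le_def, UInt32.le_iff_toNat_le]; rfl

theorem pv_up_eq (c : Char) : pv_is_uppercase c = PySem.Chars.isupper c := by
  simp only [pv_is_uppercase, PySem.Chars.isupper, char_le_iff]

-- ===== VERDICT =====
theorem reverse_case_match_spec : Claim_equal_reverse_case_match := by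
  intro s _
  unfold Spec_reverse_case_match reverse_case_match reverse_case_match_alt
  rw [pvMatchLow_eq, pvPushUps_eq]
  simp only [A_eq, PySem.Chars.join_nil_singletons]
  have hmap : PySem.Chars.lower ((s.toList.reverse).filter pv_is_uppercase)
      = ((s.toList.reverse).filter pv_is_uppercase).map pvLowOf := by
    unfold PySem.Chars.lower
    apply List.map_congr_left
    intro c hc
    have hu : pv_is_uppercase c = true := (List.mem_filter.mp hc).2
    rw [pv_up_eq] at hu
    simp [PySem.Chars.lowerChar, hu, pvLowOf]
  rw [hmap]
  have hrev : ((s.toList.filter pv_is_uppercase).map pvLowOf).reverse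
      = ((s.toList.reverse).filter pv_is_uppercase).map pvLowOf := by
    simp [List.filter_reverse]
  rw [← hrev, Bool.eq_iff_iff]
  simp
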